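-- pv_equiv track=rewrite | github.com/alexmocanu07/FII-CN | tema1.py | get_C
-- ===== SOURCE A (Python) =====
-- def plus(a,b):
--     if a == 0 and b == 0: return 0
--     return 1
--
-- def NUM(v):
--     v = v[::-1]
--     v_string = ""
--     for i in range(0,len(v)):
--         v_string += str(v[i])
--     return int(v_string, 2)
--
-- def get_k(j):
--     k = 0
--     while 2**k < j: k +=1
--     if 2**k > j: k -=1
--     return k
--
-- def lines_sum(a,b):
--     output = list()
--     for i in range(0, len(a)):
--         output.append(plus(a[i], b[i]))
--     return output
--
-- def matrix_sum(a,b):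
--     output = list()
--     for i in range(0,len(a)):
--         line = list()
--         for j in range(0,len(a)):
--             line.append(plus(a[i][j], b[i][j]))
--         output.append(line)
--     return output
--
-- def get_C(B_split, A_split, n, p, m):
--     C = [[0]* n] * n
--     for i in range(0,p):
--         sum_linii_B = list()
--         sum_linii_B.append([0 for i in range(0,n)])
--         for j in range(1, 2**m):
--             k = get_k(j)
--
--             sum_linii_B.append(lines_sum(sum_linii_B[j-2**k], B_split[i][k]))
--
--         C = matrix_sum(C, [sum_linii_B[NUM(A_split[i][r])] for r in range(0, n)])
--
--     return C
-- ===== SOURCE B (Python) =====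
-- def get_C(B_split, A_split, n, p, m):
--     # Direct blockwise OR: no 2^m subset table, no binary-string round trip.
--     C = [[0] * n] * n
--     for i in range(p):
--         newC = []
--         for r in range(n):
--             acc = list(C[r])
--             arow = A_split[i][r]
--             for k in range(len(arow)):
--                 if arow[k] == 1:
--                     brow = B_split[i][k]
--                     for c in range(n):
--                         if acc[c] == 0 and brow[c] != 0:
--                             acc[c] = 1
--             newC.append(acc)
--         C = newC
--     return C
-- ===== Notes on version B (the rewrite author's own statement) =====
-- stated objective: simpler
-- what changed: B drops the 2^m subset-sum table, the get_k logarithm loop and the NUM binary-string round trip: for each block and each output row it ORs together exactly the B_split rows whose A_split bit is 1, accumulating straight into C.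
import Mathlib
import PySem

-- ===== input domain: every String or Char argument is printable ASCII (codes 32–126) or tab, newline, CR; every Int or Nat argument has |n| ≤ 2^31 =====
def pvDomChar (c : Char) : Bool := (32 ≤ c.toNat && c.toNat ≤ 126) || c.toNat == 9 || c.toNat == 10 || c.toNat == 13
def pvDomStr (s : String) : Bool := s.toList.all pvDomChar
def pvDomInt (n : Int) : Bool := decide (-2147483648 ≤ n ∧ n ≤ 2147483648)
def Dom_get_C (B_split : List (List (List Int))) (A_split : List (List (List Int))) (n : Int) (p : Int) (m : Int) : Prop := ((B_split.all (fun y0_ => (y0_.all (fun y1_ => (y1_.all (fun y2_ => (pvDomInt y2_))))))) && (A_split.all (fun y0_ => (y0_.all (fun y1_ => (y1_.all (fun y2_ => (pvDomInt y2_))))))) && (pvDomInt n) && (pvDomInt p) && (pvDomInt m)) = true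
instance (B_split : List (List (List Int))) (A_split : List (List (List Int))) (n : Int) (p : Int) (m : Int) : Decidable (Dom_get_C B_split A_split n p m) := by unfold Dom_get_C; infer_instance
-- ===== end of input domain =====

-- B replaces A's 2^m subset-sum table and binary-string NUM decoding by a direct
-- per-row OR of the selected B_split rows (objective: simpler).

-- ===== PORT A =====
-- 'def plus(a,b)'
def plusP (a b : Int) : Int := if a = 0 ∧ b = 0 then 0 else 1

-- parser for Python's int(v_string, 2), exact on the alphabet reachable in NUM:
-- v_string is a concatenation of str(int)s, so it contains only decimal digits and '-';
-- int(s, 2) on such strings succeeds exactly on an optional leading '-' followed by a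
-- nonempty run of '0'/'1' characters (none = ValueError elsewhere).
def binDigitsP : List Char → Nat → Option Nat
  | [], acc => some acc
  | c :: cs, acc =>
      if c = '0' then binDigitsP cs (2 * acc)
      else if c = '1' then binDigitsP cs (2 * acc + 1) else none

def parseBin2P (s : List Char) : Option Int :=
  match s with
  | [] => none
  | '-' :: rest => if rest = [] then none else (binDigitsP rest 0).map (fun v => -(v : Int))
  | _ => (binDigitsP s 0).map (fun v => (v : Int))

-- 'def NUM(v)': v = v[::-1]; loop appends str(v[i]); int(v_string, 2)
def NUMP (v : List Int) : Option Int :=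
  parseBin2P (v.reverse.foldl (fun s x => s ++ PySem.Int.toChars x) [])

-- 'while 2**k < j: k += 1' — fuel j.toNat is enough since j ≤ 2^j for the j ≥ 1 this is called on
def get_k_loopP (j : Int) : Nat → Nat → Nat
  | k, 0 => k
  | k, fuel + 1 => if (2 : Int) ^ k < j then get_k_loopP j (k + 1) fuel else k

def get_kP (j : Int) : Int :=
  let k := get_k_loopP j 0 j.toNat
  if (2 : Int) ^ k > j then (k : Int) - 1 else (k : Int)

-- 'def lines_sum(a,b)' (b[i] raises when b is shorter than a: excluded by Pre_; getD 0 there)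
def lines_sumP (a b : List Int) : List Int :=
  (List.range a.length).foldl (fun out i => out ++ [plusP (a.getD i 0) (b.getD i 0)]) []

-- 'def matrix_sum(a,b)'
def matrix_sumP (a b : List (List Int)) : List (List Int) :=
  (List.range a.length).foldl (fun out i =>
    out ++ [(List.range a.length).foldl (fun line j =>
      line ++ [plusP ((a.getD i []).getD j 0) ((b.getD i []).getD j 0)]) []]) []

-- 'def get_C(...)': C = [[0]*n]*n; per block, the 2^m subset-OR table, then matrix_sum.
-- range(1, 2**m) raises for m < 0 (float) — excluded by Pre_, here the m.toNat range is empty;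
-- for j ≥ 1, get_k j ≥ 0 and j - 2^get_k(j) ≥ 0, so the .toNat on the exponent and the
-- pyGet? index are exact.
def get_C (B_split : List (List (List Int))) (A_split : List (List (List Int))) (n : Int) (p : Int) (m : Int) : List (List Int) :=
  let C0 : List (List Int) := List.replicate n.toNat (List.replicate n.toNat 0)
  (List.range p.toNat).foldl (fun C i =>
    let Bi := B_split.getD i []
    let Ai := A_split.getD i []
    let table := (List.range' 1 (2 ^ m.toNat - 1)).foldl (fun t (j : Nat) =>
        let k := get_kP (j : Int)
        t ++ [lines_sumP ((PySem.List.pyGet? t ((j : Int) - 2 ^ k.toNat)).getD [])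
                         (Bi.getD k.toNat [])])
      [List.replicate n.toNat 0]
    let M := (List.range n.toNat).foldl (fun out r =>
        out ++ [(PySem.List.pyGet? table ((NUMP (Ai.getD r [])).getD 0)).getD []]) []
    matrix_sumP C M) C0

-- ===== PORT B =====
def get_C_alt (B_split : List (List (List Int))) (A_split : List (List (List Int))) (n : Int) (p : Int) (m : Int) : List (List Int) :=
  let C0 : List (List Int) := List.replicate n.toNat (List.replicate n.toNat 0)
  (List.range p.toNat).foldl (fun C i =>
    (List.range n.toNat).foldl (fun newC r =>
      let arow := (A_split.getD i []).getD r []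
      let acc := (List.range arow.length).foldl (fun acc k =>
          if arow.getD k 0 = 1 then
            let brow := (B_split.getD i []).getD k []
            (List.range n.toNat).foldl (fun acc2 c =>
              if acc2.getD c 0 = 0 ∧ brow.getD c 0 ≠ 0 then acc2.set c 1 else acc2) acc
          else acc) (C.getD r [])
      newC ++ [acc]) []) C0

-- ===== PRECONDITION & SPEC =====
-- Pre_ restricts to the natural domain of this Four-Russians routine: for the p·n A_split
-- bit-rows actually read, nonempty rows of 0/1 bits with bits at positions ≥ m zero, and
-- B_split blocks of at least m rows of length at least n.  Outside it A raises
-- (ValueError from int('',2)/int('2',2), IndexError, TypeError for m < 0) except on rows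
-- whose non-bit entries happen to re-parse, concatenated, as a small binary numeral —
-- an accidental decimal-as-binary value outside the routine's bit-matrix domain (see cites).
def Pre_get_C (B_split : List (List (List Int))) (A_split : List (List (List Int))) (n : Int) (p : Int) (m : Int) : Prop :=
  p ≤ 0 ∨
  (0 ≤ m ∧ p.toNat ≤ B_split.length ∧ p.toNat ≤ A_split.length ∧
   ∀ i < p.toNat,
     m.toNat ≤ (B_split.getD i []).length ∧
     (∀ k < m.toNat, n.toNat ≤ ((B_split.getD i []).getD k []).length) ∧
     n.toNat ≤ (A_split.getD i []).length ∧
     ∀ r < n.toNat,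
       (A_split.getD i []).getD r [] ≠ [] ∧
       (∀ x ∈ (A_split.getD i []).getD r [], x = 0 ∨ x = 1) ∧
       (∀ k < ((A_split.getD i []).getD r []).length, m.toNat ≤ k →
          ((A_split.getD i []).getD r []).getD k 0 = 0))

instance (B_split : List (List (List Int))) (A_split : List (List (List Int))) (n : Int) (p : Int) (m : Int) : Decidable (Pre_get_C B_split A_split n p m) := by
  unfold Pre_get_C; infer_instance

def pvWitness_get_C : List (List (List Int)) × List (List (List Int)) × Int × Int × Int :=
  ([[[1, 0], [0, 1]]], [[[1, 0], [0, 1]]], 2, 1, 2)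

def Spec_get_C (B_split : List (List (List Int))) (A_split : List (List (List Int))) (n : Int) (p : Int) (m : Int) (out : List (List Int)) : Prop := out = get_C_alt B_split A_split n p m
instance (B_split : List (List (List Int))) (A_split : List (List (List Int))) (n : Int) (p : Int) (m : Int) (out : List (List Int)) : Decidable (Spec_get_C B_split A_split n p m out) := by unfold Spec_get_C; infer_instance

-- ===== CLAIM (what is proved, stated in full; the proofs are below) =====
def Claim_equal_get_C : Prop := ∀ (B_split : List (List (List Int))) (A_split : List (List (List Int))) (n : Int) (p : Int) (m : Int), Dom_get_C B_split A_split n p m → Pre_get_C B_split A_split n p m → Spec_get_C B_split A_split n p m (get_C B_split A_split n p m)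

-- ===== LEMMAS AND PROOFS =====

-- the bit value Σ v[k]·2^k of a 0/1 list
def numN : List Int → Nat
  | [] => 0
  | x :: xs => x.toNat + 2 * numN xs

lemma map_getD_range (l : List Int) : (List.range l.length).map (fun c => l.getD c 0) = l := by
  apply List.ext_getElem
  · simp
  · intro i h1 h2
    simp [List.getD_eq_getElem?_getD, List.getElem?_eq_getElem h2]

lemma numN_testBit (v : List Int) (hb : ∀ x ∈ v, x = 0 ∨ x = 1) (k : Nat) :
    (numN v).testBit k = decide (v.getD k 0 = 1) := by
  induction v generalizing k with
  | nil => simp [numN]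
  | cons x xs ih =>
    rcases hb x (by simp) with h0 | h1
    · subst h0
      cases k with
      | zero => simp [numN, Nat.testBit_zero]
      | succ k =>
        have ihx := ih (fun y hy => hb y (by simp [hy])) k
        simp only [numN, List.getD_cons_succ]
        rw [← ihx]
        rw [show ((0:Int).toNat + 2 * numN xs) = 2 * numN xs by simp, Nat.testBit_succ]
        congr 1
        omega
    · subst h1
      cases k with
      | zero => simp [numN, Nat.testBit_zero]
      | succ k =>
        have ihx := ih (fun y hy => hb y (by simp [hy])) k
        simp only [numN, List.getD_cons_succ]
        rw [← ihx, Nat.testBit_succ]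
        congr 1
        omega

lemma numN_lt (v : List Int) (mn : Nat) (hb : ∀ x ∈ v, x = 0 ∨ x = 1)
    (hz : ∀ k < v.length, mn ≤ k → v.getD k 0 = 0) : numN v < 2 ^ mn := by
  induction v generalizing mn with
  | nil => simp [numN]
  | cons x xs ih =>
    cases mn with
    | zero =>
      have hx : x = 0 := hz 0 (by simp) (by omega)
      have hxs : numN xs < 2 ^ 0 := by
        apply ih 0 (fun y hy => hb y (by simp [hy]))
        intro k hk _
        have := hz (k+1) (by simpa using Nat.succ_lt_succ hk) (by omega)
        simpa using this
      simp [numN, hx] at *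
      omega
    | succ mn =>
      have hxs : numN xs < 2 ^ mn := by
        apply ih mn (fun y hy => hb y (by simp [hy]))
        intro k hk hm
        have := hz (k+1) (by simpa using Nat.succ_lt_succ hk) (by omega)
        simpa using this
      have hx : x.toNat ≤ 1 := by rcases hb x (by simp) with h | h <;> simp [h]
      simp only [numN, pow_succ]
      omega

def bitChar (x : Int) : Char := if x = 1 then '1' else '0'

lemma binDigits_append (u w : List Char) (acc : Nat) :
    binDigitsP (u ++ w) acc = (binDigitsP u acc).bind (fun a => binDigitsP w a) := by
  induction u generalizing acc with
  | nil => simp [binDigitsP]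
  | cons c cs ih =>
    simp only [List.cons_append, binDigitsP]
    split_ifs <;> simp [ih]

lemma binDigits_bits (v : List Int) (hb : ∀ x ∈ v, x = 0 ∨ x = 1) (acc : Nat) :
    binDigitsP ((v.map bitChar).reverse) acc = some (acc * 2 ^ v.length + numN v) := by
  induction v generalizing acc with
  | nil => simp [binDigitsP, numN]
  | cons x xs ih =>
    have hrev : ((x :: xs).map bitChar).reverse = (xs.map bitChar).reverse ++ [bitChar x] := by
      simp
    rw [hrev, binDigits_append, ih (fun y hy => hb y (by simp [hy]))]
    rcases hb x (by simp) with h | h <;>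
      simp [h, bitChar, binDigitsP, numN, pow_succ] <;> ring

lemma strOf_bits (v : List Int) (hb : ∀ x ∈ v, x = 0 ∨ x = 1) (init : List Char) :
    v.foldl (fun s x => s ++ PySem.Int.toChars x) init = init ++ v.map bitChar := by
  induction v generalizing init with
  | nil => simp
  | cons x xs ih =>
    rcases hb x (by simp) with h | h <;>
      · subst h
        rw [List.foldl_cons, ih (fun y hy => hb y (by simp [hy]))]
        simp [bitChar]
        rfl

lemma NUMP_eq (v : List Int) (hne : v ≠ []) (hb : ∀ x ∈ v, x = 0 ∨ x = 1) :
    NUMP v = some ((numN v : Nat) : Int) := by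
  unfold NUMP
  rw [strOf_bits v.reverse (by intro x hx; exact hb x (by simpa using hx)) []]
  have : (v.reverse.map bitChar) = (v.map bitChar).reverse := by simp
  rw [List.nil_append, this]
  obtain ⟨c, cs, hc⟩ : ∃ c cs, (v.map bitChar).reverse = c :: cs := by
    rcases List.exists_cons_of_ne_nil (l := (v.map bitChar).reverse) (by simpa using hne) with ⟨c, cs, h⟩
    exact ⟨c, cs, h⟩
  have hbd := binDigits_bits v hb 0
  rw [hc] at hbd ⊢
  have hcval : c = '0' ∨ c = '1' := by
    have : c ∈ (v.map bitChar).reverse := by rw [hc]; simp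
    simp only [List.mem_reverse, List.mem_map] at this
    obtain ⟨x, _, hx⟩ := this
    unfold bitChar at hx
    split_ifs at hx
    · right; exact hx.symm
    · left; exact hx.symm
  rcases hcval with h | h <;> subst h <;> simp [parseBin2P, hbd]

lemma get_k_loop_spec (j : Int) : ∀ (fuel k : Nat), j ≤ 2 ^ (k + fuel) →
    k ≤ get_k_loopP j k fuel ∧ j ≤ (2:Int) ^ (get_k_loopP j k fuel) ∧
      ∀ k', k ≤ k' → k' < get_k_loopP j k fuel → (2:Int) ^ k' < j := by
  intro fuel
  induction fuel with
  | zero =>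
    intro k h
    simp only [get_k_loopP]
    exact ⟨le_refl _, by simpa using h, fun k' h1 h2 => absurd (lt_of_le_of_lt h1 h2) (lt_irrefl k)⟩
  | succ fuel ih =>
    intro k h
    simp only [get_k_loopP]
    split_ifs with hlt
    · have := ih (k + 1) (by rw [show k + 1 + fuel = k + (fuel + 1) by ring]; exact h)
      refine ⟨by omega, this.2.1, fun k' h1 h2 => ?_⟩
      rcases Nat.eq_or_lt_of_le h1 with rfl | h1'
      · exact hlt
      · exact this.2.2 k' (by omega) h2
    · exact ⟨le_refl _, by omega, fun k' h1 h2 => absurd (lt_of_le_of_lt h1 h2) (lt_irrefl k)⟩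

lemma get_k_spec (j : Nat) (hj : 1 ≤ j) :
    ∃ K : Nat, get_kP (j : Int) = (K : Int) ∧ 2 ^ K ≤ j ∧ j < 2 ^ (K + 1) := by
  have hfuel : (j : Int) ≤ 2 ^ (0 + (j : Int).toNat) := by
    rw [Nat.zero_add, Int.toNat_natCast]
    exact_mod_cast (Nat.lt_two_pow_self (n := j)).le
  obtain ⟨-, h2, hmin⟩ := get_k_loop_spec (j : Int) (j : Int).toNat 0 hfuel
  set R := get_k_loopP (j : Int) 0 (j : Int).toNat with hR
  have hgoal : get_kP (j : Int) = (if (2:Int) ^ R > (j:Int) then (R:Int) - 1 else (R:Int)) := by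
    unfold get_kP; rw [← hR]
  rw [hgoal]
  split_ifs with hgt
  · -- 2^R > j : R ≥ 1 and answer R-1
    have hR1 : 1 ≤ R := by
      by_contra h
      have : R = 0 := by omega
      rw [this] at hgt
      simp at hgt
      omega
    refine ⟨R - 1, ?_, ?_, ?_⟩
    · omega
    · have := hmin (R - 1) (by omega) (by omega)
      have : (2:Int) ^ (R-1) < (j : Int) := this
      exact_mod_cast this.le
    · have : (j : Int) < 2 ^ R := hgt
      have hcast : j < 2 ^ R := by exact_mod_cast this
      rwa [show R - 1 + 1 = R by omega]
  · -- 2^R ≤ j and j ≤ 2^R → equal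
    refine ⟨R, rfl, ?_, ?_⟩
    · have : (2:Int) ^ R ≤ (j : Int) := by omega
      exact_mod_cast this
    · have hj2 : (j:Int) ≤ 2 ^ R := h2
      have : j ≤ 2 ^ R := by exact_mod_cast hj2
      calc j ≤ 2 ^ R := this
        _ < 2 ^ (R + 1) := by exact Nat.pow_lt_pow_succ (by omega)

def orRow (Bi : List (List Int)) (nn mn : Nat) (s : Nat) : List Int :=
  (List.range nn).map (fun c => if ∃ k < mn, s.testBit k ∧ (Bi.getD k []).getD c 0 ≠ 0 then (1:Int) else 0)

lemma orRow_length (Bi : List (List Int)) (nn mn s : Nat) : (orRow Bi nn mn s).length = nn := by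
  simp [orRow]

lemma orRow_getD (Bi : List (List Int)) (nn mn s : Nat) (c : Nat) (hc : c < nn) :
    (orRow Bi nn mn s).getD c 0 =
      if ∃ k < mn, s.testBit k ∧ (Bi.getD k []).getD c 0 ≠ 0 then (1:Int) else 0 := by
  unfold orRow
  exact PySem.List.getD_map_range _ nn c 0 hc

lemma orRow_zero (Bi : List (List Int)) (nn mn : Nat) :
    orRow Bi nn mn 0 = List.replicate nn 0 := by
  unfold orRow
  simp

lemma lines_sumP_eq_map (a b : List Int) :
    lines_sumP a b = (List.range a.length).map (fun i => plusP (a.getD i 0) (b.getD i 0)) := by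
  unfold lines_sumP
  rw [PySem.List.foldl_append_singleton_eq_map]
  simp

lemma lines_sum_orRow (Bi : List (List Int)) (nn mn K d : Nat) (hK : K < mn) (hd : d < 2 ^ K) :
    lines_sumP (orRow Bi nn mn d) (Bi.getD K []) = orRow Bi nn mn (2 ^ K + d) := by
  rw [lines_sumP_eq_map, orRow_length]
  conv_rhs => rw [orRow]
  apply List.map_congr_left
  intro c hc
  have hc' : c < nn := List.mem_range.mp hc
  rw [orRow_getD Bi nn mn d c hc']
  have hbits : (∃ k < mn, (2 ^ K + d).testBit k ∧ (Bi.getD k []).getD c 0 ≠ 0) ↔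
      ((∃ k < mn, d.testBit k ∧ (Bi.getD k []).getD c 0 ≠ 0) ∨ (Bi.getD K []).getD c 0 ≠ 0) := by
    constructor
    · rintro ⟨k, hk, htb, hB⟩
      rcases lt_trichotomy k K with h | rfl | h
      · left; exact ⟨k, hk, by rwa [Nat.testBit_two_pow_add_gt h] at htb, hB⟩
      · right; exact hB
      · exfalso
        have : 2 ^ K + d < 2 ^ k := by
          calc 2 ^ K + d < 2 ^ K + 2 ^ K := by omega
            _ = 2 ^ (K + 1) := by ring
            _ ≤ 2 ^ k := Nat.pow_le_pow_right (by omega) (by omega)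
        rw [Nat.testBit_lt_two_pow this] at htb
        exact Bool.false_ne_true htb
    · rintro (⟨k, hk, htb, hB⟩ | hB)
      · have hkK : k < K := by
          by_contra h
          have : d < 2 ^ k := lt_of_lt_of_le hd (Nat.pow_le_pow_right (by omega) (by omega))
          rw [Nat.testBit_lt_two_pow this] at htb
          exact Bool.false_ne_true htb
        exact ⟨k, hk, by rwa [Nat.testBit_two_pow_add_gt hkK], hB⟩
      · refine ⟨K, hK, ?_, hB⟩
        rw [Nat.testBit_two_pow_add_eq, Nat.testBit_lt_two_pow hd]
        rfl
  simp only [hbits]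
  by_cases hP : ∃ k < mn, d.testBit k = true ∧ (Bi.getD k []).getD c 0 ≠ 0
  · rw [if_pos hP, if_pos (Or.inl hP)]
    unfold plusP
    rw [if_neg (by exact fun h => one_ne_zero h.1)]
  · by_cases hy : (Bi.getD K []).getD c 0 = 0
    · rw [if_neg hP, if_neg (not_or.mpr ⟨hP, fun h => h hy⟩)]
      unfold plusP
      rw [if_pos ⟨rfl, hy⟩]
    · rw [if_neg hP, if_pos (Or.inr hy)]
      unfold plusP
      rw [if_neg (by exact fun h => hy h.2)]

lemma table_build (Bi : List (List Int)) (nn mn : Nat) : ∀ J, J ≤ 2 ^ mn - 1 →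
    (List.range' 1 J).foldl (fun t (j : Nat) =>
        let k := get_kP (j : Int)
        t ++ [lines_sumP ((PySem.List.pyGet? t ((j : Int) - 2 ^ k.toNat)).getD []) (Bi.getD k.toNat [])])
      [List.replicate nn 0]
    = (List.range (J + 1)).map (orRow Bi nn mn) := by
  intro J
  induction J with
  | zero => intro _; simp [orRow_zero]
  | succ J ih =>
    intro hJ
    rw [List.range'_1_concat, List.foldl_append, ih (by omega)]
    set j := 1 + J with hj
    have hj1 : 1 ≤ j := by omega
    have hjlt : j < 2 ^ mn := by
      have : 1 ≤ 2 ^ mn := Nat.one_le_two_pow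
      omega
    obtain ⟨K, hkP, hKle, hKlt⟩ := get_k_spec j hj1
    have hKmn : K < mn := by
      by_contra h
      have : 2 ^ mn ≤ 2 ^ K := Nat.pow_le_pow_right (by omega) (by omega)
      omega
    set d := j - 2 ^ K with hd
    have hdlt : d < 2 ^ K := by omega
    have hdj : d < j + 1 := by
      have : 1 ≤ 2 ^ K := Nat.one_le_two_pow
      omega
    have hidx : (j : Int) - 2 ^ ((get_kP (j : Int)).toNat) = ((d : Nat) : Int) := by
      rw [hkP]
      simp only [Int.toNat_natCast]
      rw [show ((2:Int) ^ K) = ((2 ^ K : Nat) : Int) by push_cast; ring]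
      omega
    simp only [List.foldl_cons, List.foldl_nil]
    conv_rhs => rw [List.range_succ, List.map_append]
    congr 1
    have hget : PySem.List.pyGet? ((List.range (J + 1)).map (orRow Bi nn mn)) ((j:Int) - 2 ^ ((get_kP (j:Int)).toNat)) = some (orRow Bi nn mn d) := by
      rw [hidx, PySem.List.pyGet?_natCast]
      rw [List.getElem?_map]
      rw [List.getElem?_range (by omega : d < J + 1)]
      rfl
    rw [hget]
    simp only [Option.getD_some]
    rw [hkP]
    simp only [Int.toNat_natCast]
    rw [lines_sum_orRow Bi nn mn K d hKmn hdlt]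
    have : 2 ^ K + d = j := by omega
    rw [this]
    rw [show j = J + 1 by omega]
    simp

lemma table_spec (Bi : List (List Int)) (nn mn : Nat) :
    (List.range' 1 (2 ^ mn - 1)).foldl (fun t (j : Nat) =>
        let k := get_kP (j : Int)
        t ++ [lines_sumP ((PySem.List.pyGet? t ((j : Int) - 2 ^ k.toNat)).getD []) (Bi.getD k.toNat [])])
      [List.replicate nn 0]
    = (List.range (2 ^ mn)).map (orRow Bi nn mn) := by
  rw [table_build Bi nn mn (2 ^ mn - 1) (le_refl _), Nat.sub_add_cancel Nat.one_le_two_pow]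

-- the inner c-loop of B: pointwise conditional update
lemma setFold (brow : List Int) (nn : Nat) (acc : List Int) (hlen : acc.length = nn) :
    (List.range nn).foldl (fun acc2 c =>
        if acc2.getD c 0 = 0 ∧ brow.getD c 0 ≠ 0 then acc2.set c 1 else acc2) acc
    = (List.range nn).map (fun c => if acc.getD c 0 = 0 ∧ brow.getD c 0 ≠ 0 then 1 else acc.getD c 0) := by
  have main : ∀ t ≤ nn, (List.range t).foldl (fun acc2 c =>
        if acc2.getD c 0 = 0 ∧ brow.getD c 0 ≠ 0 then acc2.set c 1 else acc2) acc
      = (List.range nn).map (fun c =>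
          if c < t ∧ acc.getD c 0 = 0 ∧ brow.getD c 0 ≠ 0 then 1 else acc.getD c 0) := by
    intro t
    induction t with
    | zero =>
      intro _
      simp only [List.range_zero, List.foldl_nil]
      conv_lhs => rw [← map_getD_range acc]
      rw [hlen]
      apply List.map_congr_left
      intro c _
      rw [if_neg (by omega)]
    | succ t iht =>
      intro ht
      rw [List.range_succ, List.foldl_append, iht (by omega)]
      simp only [List.foldl_cons, List.foldl_nil]
      have hgetDt : ((List.range nn).map (fun c =>
          if c < t ∧ acc.getD c 0 = 0 ∧ brow.getD c 0 ≠ 0 then (1:Int) else acc.getD c 0)).getD t 0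
          = acc.getD t 0 := by
        rw [List.getD_eq_getElem?_getD, List.getElem?_map, List.getElem?_range (by omega : t < nn)]
        simp only [Option.map_some, Option.getD_some]
        rw [if_neg (by omega)]
      by_cases hcond : acc.getD t 0 = 0 ∧ brow.getD t 0 ≠ 0
      · rw [if_pos (by rw [hgetDt]; exact hcond)]
        apply List.ext_getElem
        · simp
        · intro i h1 h2
          simp only [List.length_set, List.length_map, List.length_range] at h1 h2
          rw [List.getElem_set]
          simp only [List.getElem_map, List.getElem_range]
          by_cases h3 : t = i
          · subst h3
            rw [if_pos rfl, if_pos ⟨by omega, hcond⟩]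
          · rw [if_neg h3]
            by_cases h4 : i < t ∧ acc.getD i 0 = 0 ∧ brow.getD i 0 ≠ 0
            · rw [if_pos h4, if_pos ⟨by omega, h4.2⟩]
            · rw [if_neg h4, if_neg (by rintro ⟨h5, h6⟩; exact h4 ⟨by omega, h6⟩)]
      · rw [if_neg (by rw [hgetDt]; exact hcond)]
        apply List.map_congr_left
        intro c _
        by_cases hc : c < t ∧ acc.getD c 0 = 0 ∧ brow.getD c 0 ≠ 0
        · rw [if_pos hc, if_pos ⟨by omega, hc.2⟩]
        · rw [if_neg hc, if_neg (by
            rintro ⟨h1, h2⟩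
            rcases Nat.lt_succ_iff_lt_or_eq.mp h1 with h | rfl
            · exact hc ⟨h, h2⟩
            · exact hcond h2)]
  have := main nn (le_refl nn)
  rw [this]
  apply List.map_congr_left
  intro c hc
  have : c < nn := List.mem_range.mp hc
  by_cases h : acc.getD c 0 = 0 ∧ brow.getD c 0 ≠ 0
  · rw [if_pos ⟨this, h⟩, if_pos h]
  · rw [if_neg (by rintro ⟨_, h2⟩; exact h h2), if_neg h]

-- the k-loop of B: OR of the selected B rows into the current C row
lemma innerFold (Bi : List (List Int)) (nn : Nat) (arow Crow : List Int)
    (hlen : Crow.length = nn) (hbits : ∀ x ∈ Crow, x = 0 ∨ x = 1) :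
    (List.range arow.length).foldl (fun acc k =>
        if arow.getD k 0 = 1 then
          let brow := Bi.getD k []
          (List.range nn).foldl (fun acc2 c =>
            if acc2.getD c 0 = 0 ∧ brow.getD c 0 ≠ 0 then acc2.set c 1 else acc2) acc
        else acc) Crow
    = (List.range nn).map (fun c =>
        if (∃ k < arow.length, arow.getD k 0 = 1 ∧ (Bi.getD k []).getD c 0 ≠ 0) ∨ Crow.getD c 0 ≠ 0
        then 1 else 0) := by
  have main : ∀ t ≤ arow.length, (List.range t).foldl (fun acc k =>
        if arow.getD k 0 = 1 then
          let brow := Bi.getD k []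
          (List.range nn).foldl (fun acc2 c =>
            if acc2.getD c 0 = 0 ∧ brow.getD c 0 ≠ 0 then acc2.set c 1 else acc2) acc
        else acc) Crow
      = (List.range nn).map (fun c =>
          if (∃ k < t, arow.getD k 0 = 1 ∧ (Bi.getD k []).getD c 0 ≠ 0) ∨ Crow.getD c 0 ≠ 0
          then 1 else 0) := by
    intro t
    induction t with
    | zero =>
      intro _
      simp only [List.range_zero, List.foldl_nil]
      conv_lhs => rw [← map_getD_range Crow]
      rw [hlen]
      apply List.map_congr_left
      intro c hcm
      have hc : c < nn := List.mem_range.mp hcm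
      have hmem : Crow.getD c 0 ∈ Crow := by
        rw [List.getD_eq_getElem Crow 0 (by omega)]
        exact List.getElem_mem _
      by_cases h : Crow.getD c 0 = 0
      · rw [if_neg (fun hor => by
          rcases hor with ⟨k, hk, _⟩ | h2
          · omega
          · exact h2 h)]
        exact h
      · rw [if_pos (Or.inr h)]
        rcases hbits _ hmem with h0 | h1
        · exact absurd h0 h
        · exact h1
    | succ t iht =>
      intro ht
      rw [List.range_succ, List.foldl_append, iht (by omega)]
      simp only [List.foldl_cons, List.foldl_nil]
      by_cases hsel : arow.getD t 0 = 1
      · rw [if_pos hsel]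
        rw [setFold (Bi.getD t []) nn _ (by simp)]
        apply List.map_congr_left
        intro c hcm
        have hc : c < nn := List.mem_range.mp hcm
        have hgetD : ((List.range nn).map (fun c =>
            if (∃ k < t, arow.getD k 0 = 1 ∧ (Bi.getD k []).getD c 0 ≠ 0) ∨ Crow.getD c 0 ≠ 0
            then (1:Int) else 0)).getD c 0
            = if (∃ k < t, arow.getD k 0 = 1 ∧ (Bi.getD k []).getD c 0 ≠ 0) ∨ Crow.getD c 0 ≠ 0
              then (1:Int) else 0 := by
          exact PySem.List.getD_map_range _ nn c 0 hc
        rw [hgetD]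
        by_cases hA : (∃ k < t, arow.getD k 0 = 1 ∧ (Bi.getD k []).getD c 0 ≠ 0) ∨ Crow.getD c 0 ≠ 0
        · rw [if_pos hA]
          rw [if_neg (by rintro ⟨h1, _⟩; exact one_ne_zero h1)]
          rw [if_pos (by
            rcases hA with ⟨k, hk, hrest⟩ | h2
            · exact Or.inl ⟨k, by omega, hrest⟩
            · exact Or.inr h2)]
        · rw [if_neg hA]
          by_cases hB : (Bi.getD t []).getD c 0 ≠ 0
          · rw [if_pos ⟨rfl, hB⟩, if_pos (Or.inl ⟨t, by omega, hsel, hB⟩)]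
          · rw [if_neg (by rintro ⟨_, h2⟩; exact hB h2)]
            rw [if_neg (by
              rintro (⟨k, hk, h1, h2⟩ | h2)
              · rcases Nat.lt_succ_iff_lt_or_eq.mp hk with h | rfl
                · exact hA (Or.inl ⟨k, h, h1, h2⟩)
                · exact hB h2
              · exact hA (Or.inr h2))]
      · rw [if_neg hsel]
        apply List.map_congr_left
        intro c _
        by_cases hA : (∃ k < t, arow.getD k 0 = 1 ∧ (Bi.getD k []).getD c 0 ≠ 0) ∨ Crow.getD c 0 ≠ 0
        · rw [if_pos hA, if_pos (by
            rcases hA with ⟨k, hk, hrest⟩ | h2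
            · exact Or.inl ⟨k, by omega, hrest⟩
            · exact Or.inr h2)]
        · rw [if_neg hA, if_neg (by
            rintro (⟨k, hk, h1, h2⟩ | h2)
            · rcases Nat.lt_succ_iff_lt_or_eq.mp hk with h | rfl
              · exact hA (Or.inl ⟨k, h, h1, h2⟩)
              · exact hsel h1
            · exact hA (Or.inr h2))]
  exact main arow.length (le_refl _)

lemma matrix_sumP_eq_map (a b : List (List Int)) :
    matrix_sumP a b = (List.range a.length).map (fun i =>
      (List.range a.length).map (fun j => plusP ((a.getD i []).getD j 0) ((b.getD i []).getD j 0))) := by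
  unfold matrix_sumP
  simp only [PySem.List.foldl_append_singleton_eq_map]
  simp

lemma matrix_sumP_WF (a b : List (List Int)) (nn : Nat) (hlen : a.length = nn) :
    (matrix_sumP a b).length = nn ∧
      ∀ row ∈ matrix_sumP a b, row.length = nn ∧ ∀ x ∈ row, x = 0 ∨ x = 1 := by
  rw [matrix_sumP_eq_map, hlen]
  refine ⟨by simp, ?_⟩
  intro row hrow
  simp only [List.mem_map, List.mem_range] at hrow
  obtain ⟨i, _, rfl⟩ := hrow
  refine ⟨by simp, ?_⟩
  intro x hx
  simp only [List.mem_map] at hx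
  obtain ⟨j, _, rfl⟩ := hx
  unfold plusP
  split_ifs <;> simp

lemma foldl_eq_of_inv {α β : Type} (f g : α → β → α) (P : α → Prop) :
    ∀ (l : List β) (a : α), P a → (∀ c x, x ∈ l → P c → f c x = g c x ∧ P (f c x)) →
      l.foldl f a = l.foldl g a := by
  intro l
  induction l with
  | nil => intro a _ _; rfl
  | cons x xs ih =>
    intro a hPa hstep
    simp only [List.foldl_cons]
    obtain ⟨heq, hP⟩ := hstep a x (by simp) hPa
    rw [← heq]
    exact ih (f a x) hP (fun c y hy hc => hstep c y (by simp [hy]) hc)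

lemma step_eq (Bi Ai : List (List Int)) (nn mn : Nat) (C : List (List Int))
    (hWF : C.length = nn ∧ ∀ row ∈ C, row.length = nn ∧ ∀ x ∈ row, x = 0 ∨ x = 1)
    (hrows : ∀ r < nn, Ai.getD r [] ≠ [] ∧ (∀ x ∈ Ai.getD r [], x = 0 ∨ x = 1) ∧
        ∀ k < (Ai.getD r []).length, mn ≤ k → (Ai.getD r []).getD k 0 = 0) :
    matrix_sumP C ((List.range nn).foldl (fun out r =>
        out ++ [(PySem.List.pyGet? ((List.range' 1 (2 ^ mn - 1)).foldl (fun t (j : Nat) =>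
            let k := get_kP (j : Int)
            t ++ [lines_sumP ((PySem.List.pyGet? t ((j : Int) - 2 ^ k.toNat)).getD []) (Bi.getD k.toNat [])])
          [List.replicate nn 0]) ((NUMP (Ai.getD r [])).getD 0)).getD []]) [])
    = (List.range nn).foldl (fun newC r =>
        let arow := Ai.getD r []
        let acc := (List.range arow.length).foldl (fun acc k =>
            if arow.getD k 0 = 1 then
              let brow := Bi.getD k []
              (List.range nn).foldl (fun acc2 c =>
                if acc2.getD c 0 = 0 ∧ brow.getD c 0 ≠ 0 then acc2.set c 1 else acc2) acc
            else acc) (C.getD r [])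
        newC ++ [acc]) [] := by
  rw [table_spec Bi nn mn]
  rw [PySem.List.foldl_append_singleton_eq_map, PySem.List.foldl_append_singleton_eq_map]
  simp only [List.nil_append]
  rw [matrix_sumP_eq_map, hWF.1]
  apply List.map_congr_left
  intro r hrm
  have hr : r < nn := List.mem_range.mp hrm
  obtain ⟨hne, hbits, hz⟩ := hrows r hr
  -- the C row
  have hCrow : (C.getD r []).length = nn ∧ ∀ x ∈ C.getD r [], x = 0 ∨ x = 1 := by
    have : C.getD r [] ∈ C := by
      rw [List.getD_eq_getElem C [] (by omega)]
      exact List.getElem_mem _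
    exact hWF.2 _ this
  rw [innerFold Bi nn (Ai.getD r []) (C.getD r []) hCrow.1 hCrow.2]
  -- the M row
  have hnum : NUMP (Ai.getD r []) = some ((numN (Ai.getD r []) : Nat) : Int) :=
    NUMP_eq _ hne hbits
  have hlt : numN (Ai.getD r []) < 2 ^ mn := numN_lt _ mn hbits hz
  have hMr : ((List.range nn).map (fun r =>
      (PySem.List.pyGet? ((List.range (2 ^ mn)).map (orRow Bi nn mn))
        ((NUMP (Ai.getD r [])).getD 0)).getD [])).getD r []
      = orRow Bi nn mn (numN (Ai.getD r [])) := by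
    rw [PySem.List.getD_map_range _ nn r [] hr, hnum]
    simp only [Option.getD_some]
    rw [PySem.List.pyGet?_natCast]
    rw [List.getElem?_map, List.getElem?_range hlt]
    rfl
  rw [hMr]
  apply List.map_congr_left
  intro c hcm
  have hc : c < nn := List.mem_range.mp hcm
  rw [orRow_getD Bi nn mn _ c hc]
  have hQ : (∃ k < mn, (numN (Ai.getD r [])).testBit k ∧ (Bi.getD k []).getD c 0 ≠ 0) ↔
      (∃ k < (Ai.getD r []).length, (Ai.getD r []).getD k 0 = 1 ∧ (Bi.getD k []).getD c 0 ≠ 0) := by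
    constructor
    · rintro ⟨k, hk, htb, hB⟩
      rw [numN_testBit _ hbits] at htb
      have hk1 : (Ai.getD r []).getD k 0 = 1 := by simpa using htb
      refine ⟨k, ?_, hk1, hB⟩
      by_contra h
      rw [List.getD_eq_default] at hk1
      · omega
      · omega
    · rintro ⟨k, hk, h1, hB⟩
      have hkmn : k < mn := by
        by_contra h
        have := hz k hk (by omega)
        omega
      refine ⟨k, hkmn, ?_, hB⟩
      rw [numN_testBit _ hbits]
      simpa using h1
  simp only [hQ]
  set a := (C.getD r []).getD c 0 with ha
  have hav : a = 0 ∨ a = 1 := by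
    by_cases hclen : c < (C.getD r []).length
    · apply hCrow.2
      rw [ha, List.getD_eq_getElem _ _ hclen]
      exact List.getElem_mem _
    · left
      rw [ha, List.getD_eq_default _ _ (by omega)]
  by_cases hP : ∃ k < (Ai.getD r []).length, (Ai.getD r []).getD k 0 = 1 ∧ (Bi.getD k []).getD c 0 ≠ 0
  · rw [if_pos hP, if_pos (Or.inl hP)]
    unfold plusP
    rw [if_neg (fun h => one_ne_zero h.2)]
  · rw [if_neg hP]
    rcases hav with h0 | h1
    · rw [if_neg (by rintro (h | h); exacts [hP h, h (ha ▸ h0)])]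
      unfold plusP
      rw [if_pos ⟨ha ▸ h0, rfl⟩]
    · rw [if_pos (Or.inr (by omega))]
      unfold plusP
      rw [if_neg (by rintro ⟨h, _⟩; omega)]

lemma get_C_main : ∀ (B_split : List (List (List Int))) (A_split : List (List (List Int))) (n : Int) (p : Int) (m : Int), Dom_get_C B_split A_split n p m → Pre_get_C B_split A_split n p m → Spec_get_C B_split A_split n p m (get_C B_split A_split n p m) := by
  intro B A n p m _ hpre
  unfold Spec_get_C get_C get_C_alt
  rcases hpre with hp | ⟨_, _, _, hblocks⟩
  · have h0 : p.toNat = 0 := by omega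
    rw [h0]
    rfl
  · apply foldl_eq_of_inv _ _
      (fun C => C.length = n.toNat ∧ ∀ row ∈ C, row.length = n.toNat ∧ ∀ x ∈ row, x = 0 ∨ x = 1)
    · refine ⟨by simp, ?_⟩
      intro row hrow
      rw [List.eq_of_mem_replicate hrow]
      exact ⟨by simp, by intro x hx; left; exact List.eq_of_mem_replicate hx⟩
    · intro c i hi hP
      have hi' : i < p.toNat := List.mem_range.mp hi
      obtain ⟨_, _, _, h4⟩ := hblocks i hi'
      refine ⟨?_, ?_⟩
      · exact step_eq (B.getD i []) (A.getD i []) n.toNat m.toNat c hP h4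
      · exact matrix_sumP_WF c _ n.toNat hP.1

-- ===== VERDICT (by name: the statement is the Claim_ definition above) =====
theorem get_C_spec : Claim_equal_get_C := by
  intro B_split A_split n p m hdom hpre
  exact get_C_main B_split A_split n p m hdom hpre
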